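-- pv_equiv track=rewrite | github.com/kvn13github/prime-number-checker | prime-number-checkerV0.5.py | is_brocard_prime
-- ===== SOURCE A (Python) =====
-- import math
--
-- def is_prime(num):
--     if num == 2 or num == 3:
--         return True
--     if num < 2 or num % 2 == 0:
--         return False
--     if num < 9:
--         return True
--     if num % 3 == 0:
--         return False
--     r = math.floor(math.sqrt(num))
--     f = 5
--     while f <= r:
--         if num % f == 0:
--             return False
--         if num % (f + 2) == 0:
--             return False
--         f += 6
--     return True
--
-- def is_brocard_prime(num):
--     if not is_prime(num):
--         return False
--     for k in range(1, num):
--         if math.factorial(k) + 1 == num: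
--             return True
--         elif math.factorial(k) + 1 > num:
--             return False
--     return False
-- ===== SOURCE B (Python) =====
-- def is_prime(num):
--     if num < 2:
--         return False
--     d = 2
--     while d * d <= num:
--         if num % d == 0:
--             return False
--         d += 1
--     return True
--
-- def is_brocard_prime(num):
--     if not is_prime(num):
--         return False
--     m = num - 1
--     d = 2
--     while m != 1:
--         if m % d == 0:
--             m //= d
--             d += 1
--         else:
--             break
--     return m == 1
-- ===== Notes on version B (the rewrite author's own statement) =====
-- stated objective: simpler
-- what changed: B tests whether num-1 is a factorial by peeling it apart (dividing by 2,3,4,... until 1 or a non-exact division) instead of A's loop that builds math.factorial(k) up for every k, and replaces A's 6k±1 sqrt wheel primality test by a plain d*d<=num trial division.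
import Mathlib
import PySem

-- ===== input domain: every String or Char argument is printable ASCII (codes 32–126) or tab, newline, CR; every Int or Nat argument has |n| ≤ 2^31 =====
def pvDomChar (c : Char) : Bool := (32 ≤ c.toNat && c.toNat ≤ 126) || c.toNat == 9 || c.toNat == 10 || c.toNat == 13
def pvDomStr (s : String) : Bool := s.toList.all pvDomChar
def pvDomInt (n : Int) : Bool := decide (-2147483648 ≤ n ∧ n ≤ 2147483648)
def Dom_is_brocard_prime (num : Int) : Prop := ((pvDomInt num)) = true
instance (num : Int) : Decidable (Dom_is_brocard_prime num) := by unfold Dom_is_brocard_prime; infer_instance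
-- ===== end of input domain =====

-- B replaces A's build-the-factorials-up search (and 6k±1 wheel) by a divide-out
-- peel of num-1 and a plain d*d ≤ num trial division: simpler, same exact values.

-- ===== PORT A =====
-- math.factorial(k): library call, ported as Nat.factorial (every call site has k ≥ 1)
def pyFactorial (k : Int) : Int := (Nat.factorial k.toNat : Int)

-- the `while f <= r` loop of A's is_prime
def aTrial (num r f : Int) : Bool :=
  if f ≤ r then
    if PySem.Int.mod num f = 0 then false
    else if PySem.Int.mod num (f + 2) = 0 then false
    else aTrial num r (f + 6)
  else true
termination_by (r + 6 - f).toNat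
decreasing_by omega

-- A's is_prime.  math.floor(math.sqrt(num)) is ported as Int.sqrt: exact here, since this
-- line is only reached with 9 ≤ num, and for 0 ≤ num ≤ 2^31 the double sqrt is correctly
-- rounded, so its floor is the integer square root.
def a_is_prime (num : Int) : Bool :=
  if num = 2 ∨ num = 3 then true
  else if num < 2 ∨ PySem.Int.mod num 2 = 0 then false
  else if num < 9 then true
  else if PySem.Int.mod num 3 = 0 then false
  else aTrial num (Int.sqrt num) 5

-- the `for k in range(1, num)` loop with its early returns, as the index recursion
-- Python's lazy range performs (k is the loop variable)
def aSearch (num k : Int) : Bool :=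
  if k < num then
    if pyFactorial k + 1 = num then true
    else if pyFactorial k + 1 > num then false
    else aSearch num (k + 1)
  else false
termination_by (num - k).toNat
decreasing_by omega

def is_brocard_prime (num : Int) : Bool :=
  if !a_is_prime num then false
  else aSearch num 1

-- ===== PORT B =====
-- the `while d * d <= num` loop of B's is_prime
def bTrial (num d : Int) : Bool :=
  if d * d ≤ num then
    if PySem.Int.mod num d = 0 then false else bTrial num (d + 1)
  else true
termination_by (num + 2 - d).toNat
decreasing_by
  have hd : d ≤ d * d := by
    by_cases h0 : d ≤ 0
    · nlinarith
    · push Not at h0; nlinarith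
  omega

def b_is_prime (num : Int) : Bool :=
  if num < 2 then false else bTrial num 2

-- the `while m != 1` peel loop; the fuel only makes the recursion structural and is
-- always sufficient at the call site (m strictly decreases at every step there)
def bPeel : Nat → Int → Int → Bool
  | 0, m, _ => m = 1
  | fu + 1, m, d =>
    if m = 1 then true
    else if PySem.Int.mod m d = 0 then bPeel fu (PySem.Int.floordiv m d) (d + 1)
    else false

def is_brocard_prime_alt (num : Int) : Bool :=
  if !b_is_prime num then false
  else bPeel num.toNat (num - 1) 2

-- ===== PRECONDITION & SPEC =====
def Spec_is_brocard_prime (num : Int) (out : Bool) : Prop := out = is_brocard_prime_alt num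
instance (num : Int) (out : Bool) : Decidable (Spec_is_brocard_prime num out) := by unfold Spec_is_brocard_prime; infer_instance

-- ===== CLAIM (what is proved, stated in full; the proofs are below) =====
def Claim_equal_is_brocard_prime : Prop := ∀ (num : Int), Dom_is_brocard_prime num → Spec_is_brocard_prime num (is_brocard_prime num)

-- ===== LEMMAS AND PROOFS =====

-- both primality loops characterised by "no divisor e with 2 ≤ e and e*e ≤ n"
lemma bTrial_spec (num d : Int) (hd2 : 2 ≤ d) :
    bTrial num d = true ↔ ∀ e : Int, d ≤ e → e * e ≤ num → ¬ e ∣ num := by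
  revert hd2
  fun_induction bTrial num d with
  | case1 d hle hmod =>
    intro hd2
    simp only [Bool.false_eq_true, false_iff]
    intro h
    exact h d le_rfl hle ((PySem.Int.mod_eq_zero_iff_dvd num d).mp hmod)
  | case2 d hle hmod ih =>
    intro hd2
    rw [ih (by omega)]
    constructor
    · intro h e he hee
      rcases eq_or_lt_of_le he with rfl | hlt
      · exact fun hd => hmod ((PySem.Int.mod_eq_zero_iff_dvd num d).mpr hd)
      · exact h e (by omega) hee
    · intro h e he hee
      exact h e (by omega) hee
  | case3 d hgt =>
    intro hd2
    simp only [true_iff]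
    intro e he hee
    have : d * d ≤ e * e :=
      mul_le_mul he he (by omega) (by omega)
    exact absurd (le_trans this hee) hgt

lemma aTrial_spec (num r f : Int) :
    aTrial num r f = true ↔
      ∀ j : ℕ, f + 6 * (j : Int) ≤ r →
        ¬ (f + 6 * (j : Int)) ∣ num ∧ ¬ (f + 6 * (j : Int) + 2) ∣ num := by
  fun_induction aTrial num r f with
  | case1 f hle hmod =>
    simp only [Bool.false_eq_true, false_iff]
    intro h
    exact (h 0 (by omega)).1 (by
      simpa using (PySem.Int.mod_eq_zero_iff_dvd num f).mp hmod)
  | case2 f hle hmod hmod2 =>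
    simp only [Bool.false_eq_true, false_iff]
    intro h
    exact (h 0 (by omega)).2 (by
      simpa using (PySem.Int.mod_eq_zero_iff_dvd num (f + 2)).mp hmod2)
  | case3 f hle hmod hmod2 ih =>
    rw [ih]
    constructor
    · intro h j hj
      cases j with
      | zero =>
        simp only [Nat.cast_zero, mul_zero, add_zero]
        exact ⟨fun hd => hmod ((PySem.Int.mod_eq_zero_iff_dvd num f).mpr hd),
               fun hd => hmod2 ((PySem.Int.mod_eq_zero_iff_dvd num (f + 2)).mpr hd)⟩
      | succ j =>
        have heq : f + 6 * ((j + 1 : ℕ) : ℤ) = f + 6 + 6 * (j : ℤ) := by push_cast; ring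
        rw [heq] at hj ⊢
        exact h j hj
    · intro h j hj
      have heq : f + 6 * ((j + 1 : ℕ) : ℤ) = f + 6 + 6 * (j : ℤ) := by push_cast; ring
      have := h (j + 1) (by rw [heq]; exact hj)
      rw [heq] at this
      exact this
  | case4 f hgt =>
    simp only [true_iff]
    intro j hj
    exact absurd (by omega : f ≤ r) hgt

lemma wheel_iff (n : Int) (h9 : 9 ≤ n) (h2 : ¬ (2:Int) ∣ n) (h3 : ¬ (3:Int) ∣ n) :
    aTrial n (Int.sqrt n) 5 = true ↔ ∀ e : Int, 2 ≤ e → e * e ≤ n → ¬ e ∣ n := by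
  have hsq : Int.sqrt n = (Nat.sqrt n.toNat : Int) := by simp [Int.sqrt]
  have hn : ((n.toNat : Int)) = n := Int.toNat_of_nonneg (by omega)
  rw [aTrial_spec, hsq]
  constructor
  · intro h e he hee hdvd
    lift e to ℕ using (by omega) with E
    have hE2 : 2 ≤ E := by exact_mod_cast he
    have hEN : E ∣ n.toNat := by
      rw [← hn] at hdvd; exact_mod_cast hdvd
    have hEE : E * E ≤ n.toNat := by
      rw [← hn] at hee; exact_mod_cast hee
    set p := E.minFac with hp_def
    have hp : p.Prime := Nat.minFac_prime (by omega)
    have hpN : p ∣ n.toNat := (E.minFac_dvd).trans hEN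
    have hple : p ≤ E := Nat.minFac_le (by omega)
    have hpp : p * p ≤ n.toNat := le_trans (Nat.mul_le_mul hple hple) hEE
    have hp2 : ¬ 2 ∣ p := fun hd => by
      have : p = 2 := ((hp.eq_one_or_self_of_dvd 2 hd).resolve_left (by norm_num)).symm
      apply h2
      rw [← hn]
      exact_mod_cast (this ▸ hpN)
    have hp3 : ¬ 3 ∣ p := fun hd => by
      have : p = 3 := ((hp.eq_one_or_self_of_dvd 3 hd).resolve_left (by norm_num)).symm
      apply h3
      rw [← hn]
      exact_mod_cast (this ▸ hpN)
    have hp5 : 5 ≤ p := by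
      have := hp.two_le
      omega
    have hpr : p ≤ Nat.sqrt n.toNat := Nat.le_sqrt.mpr hpp
    have h6 : p % 6 = 1 ∨ p % 6 = 5 := by omega
    have hpZ : ((p : Int)) ∣ n := by rw [← hn]; exact_mod_cast hpN
    rcases h6 with h6 | h6
    · -- p = (5 + 6*j) + 2 with j = (p-7)/6
      have hj : (5:ℤ) + 6 * (((p - 7) / 6 : ℕ) : ℤ) + 2 = (p : ℤ) := by
        have : 6 * ((p - 7) / 6) + 7 = p := by omega
        push_cast
        omega
      have hle : (5:ℤ) + 6 * (((p - 7) / 6 : ℕ) : ℤ) ≤ (Nat.sqrt n.toNat : Int) := by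
        push_cast
        omega
      exact (h ((p - 7) / 6) hle).2 (by rw [hj]; exact hpZ)
    · have hj : (5:ℤ) + 6 * (((p - 5) / 6 : ℕ) : ℤ) = (p : ℤ) := by
        have : 6 * ((p - 5) / 6) + 5 = p := by omega
        push_cast
        omega
      exact (h ((p - 5) / 6) (by rw [hj]; exact_mod_cast hpr)).1 (by rw [hj]; exact hpZ)
  · intro h j hj
    have hG : (5:ℤ) + 6 * (j:ℤ) = ((5 + 6 * j : ℕ) : ℤ) := by push_cast; ring
    rw [hG] at hj ⊢
    set G : ℕ := 5 + 6 * j with hGdef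
    have hjN : G ≤ Nat.sqrt n.toNat := by exact_mod_cast hj
    have hss : Nat.sqrt n.toNat * Nat.sqrt n.toNat ≤ n.toNat := Nat.sqrt_le n.toNat
    constructor
    · refine h (G:ℤ) (by exact_mod_cast (by omega : 2 ≤ G)) ?_
      rw [← hn]
      exact_mod_cast le_trans (Nat.mul_le_mul hjN hjN) hss
    · by_cases hGG : ((G:ℤ) + 2) * ((G:ℤ) + 2) ≤ n
      · exact h _ (by exact_mod_cast (by omega : (2:ℤ) ≤ (G:ℤ) + 2)) hGG
      · intro hdvd
        have hdN : (G + 2) ∣ n.toNat := by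
          rw [← hn] at hdvd; exact_mod_cast hdvd
        have hltN : n.toNat < (G + 2) * (G + 2) := by
          push Not at hGG
          rw [← hn] at hGG; exact_mod_cast hGG
        obtain ⟨C, hNC⟩ := hdN
        have hs3 : 3 ≤ Nat.sqrt n.toNat := Nat.le_sqrt.mpr (by omega)
        have hNs : 3 * Nat.sqrt n.toNat ≤ n.toNat :=
          le_trans (Nat.mul_le_mul_right _ hs3) hss
        have hC0 : C ≠ 0 := by rintro rfl; simp at hNC; omega
        have hC1 : C ≠ 1 := by rintro rfl; rw [Nat.mul_one] at hNC; omega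
        have hCG : C < G + 2 := Nat.lt_of_mul_lt_mul_left (hNC ▸ hltN)
        have hCC : C * C ≤ n.toNat := by
          calc C * C ≤ C * (G + 2) := Nat.mul_le_mul_left C (by omega)
            _ = n.toNat := by rw [hNC, Nat.mul_comm]
        refine h (C:ℤ) (by exact_mod_cast (by omega : 2 ≤ C)) ?_ ?_
        · rw [← hn]; exact_mod_cast hCC
        · rw [← hn]
          exact_mod_cast (⟨G + 2, by rw [hNC, Nat.mul_comm]⟩ : C ∣ n.toNat)

lemma a_is_prime_iff (n : Int) :
    a_is_prime n = true ↔ (2 ≤ n ∧ ∀ e : Int, 2 ≤ e → e * e ≤ n → ¬ e ∣ n) := by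
  unfold a_is_prime
  split_ifs with h23 hsmall h9 h3
  · rcases h23 with rfl | rfl
    · simp only [true_iff]
      exact ⟨by norm_num, fun e he hee => by nlinarith⟩
    · simp only [true_iff]
      exact ⟨by norm_num, fun e he hee => by nlinarith⟩
  · simp only [false_iff]
    rcases hsmall with hlt | hmod
    · intro h; omega
    · have hdvd : (2:ℤ) ∣ n := (PySem.Int.mod_eq_zero_iff_dvd n 2).mp hmod
      intro h
      exact h.2 2 le_rfl (by omega) hdvd
  · -- 2 ≤ n, n ∉ {2,3}, odd, n < 9: n = 5 or n = 7
    push Not at hsmall h23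
    have hodd : ¬ (2:ℤ) ∣ n := fun hd =>
      hsmall.2 ((PySem.Int.mod_eq_zero_iff_dvd n 2).mpr hd)
    have h57 : n = 5 ∨ n = 7 := by omega
    simp only [true_iff]
    refine ⟨by omega, fun e he hee hdvd => ?_⟩
    have he2 : e = 2 := by nlinarith
    subst he2
    exact hodd hdvd
  · simp only [false_iff]
    push Not at h9
    have hdvd : (3:ℤ) ∣ n := (PySem.Int.mod_eq_zero_iff_dvd n 3).mp h3
    intro h
    exact h.2 3 (by norm_num) (by omega) hdvd
  · push Not at h9 h23 hsmall
    have hodd : ¬ (2:ℤ) ∣ n := fun hd =>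
      hsmall.2 ((PySem.Int.mod_eq_zero_iff_dvd n 2).mpr hd)
    have h3' : ¬ (3:ℤ) ∣ n := fun hd =>
      h3 ((PySem.Int.mod_eq_zero_iff_dvd n 3).mpr hd)
    rw [wheel_iff n (by omega) hodd h3']
    constructor
    · exact fun h => ⟨by omega, h⟩
    · exact fun h => h.2

lemma b_is_prime_iff (n : Int) :
    b_is_prime n = true ↔ (2 ≤ n ∧ ∀ e : Int, 2 ≤ e → e * e ≤ n → ¬ e ∣ n) := by
  unfold b_is_prime
  split_ifs with hlt
  · simp only [false_iff]
    intro h; omega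
  · rw [bTrial_spec n 2 le_rfl]
    constructor
    · exact fun h => ⟨by omega, h⟩
    · exact fun h => h.2

lemma prime_eq (n : Int) : a_is_prime n = b_is_prime n := by
  cases ha : a_is_prime n <;> cases hb : b_is_prime n <;> try rfl
  · exact absurd ((a_is_prime_iff n).mpr ((b_is_prime_iff n).mp hb)) (by simp [ha])
  · exact absurd ((b_is_prime_iff n).mpr ((a_is_prime_iff n).mp ha)) (by simp [hb])

lemma aSearch_spec (num : Int) (fu : ℕ) :
    ∀ a : Int, 1 ≤ a → (num - a).toNat ≤ fu →
      (aSearch num a = true ↔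
        ∃ k : ℕ, a.toNat ≤ k ∧ (Nat.factorial k : Int) + 1 = num) := by
  induction fu with
  | zero =>
    intro a ha hfu
    unfold aSearch
    rw [if_neg (by omega : ¬ a < num)]
    refine iff_of_false (by simp) ?_
    rintro ⟨k, hk1, hk2⟩
    have hk : a.toNat ≤ Nat.factorial k := le_trans hk1 (Nat.self_le_factorial k)
    omega
  | succ fu ih =>
    intro a ha hfu
    unfold aSearch
    by_cases hlt : a < num
    · rw [if_pos hlt]
      split_ifs with heq hgt
      · simp only [true_iff]
        unfold pyFactorial at heq
        exact ⟨a.toNat, le_rfl, heq⟩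
      · simp only [false_iff]
        rintro ⟨k, hk1, hk2⟩
        have : Nat.factorial a.toNat ≤ Nat.factorial k := Nat.factorial_le hk1
        unfold pyFactorial at hgt
        omega
      · rw [ih (a + 1) (by omega) (by omega)]
        push Not at heq hgt
        constructor
        · rintro ⟨k, hk1, hk2⟩
          exact ⟨k, by omega, hk2⟩
        · rintro ⟨k, hk1, hk2⟩
          refine ⟨k, ?_, hk2⟩
          have hka : k ≠ a.toNat := by
            rintro rfl
            unfold pyFactorial at heq
            exact heq hk2
          omega
    · rw [if_neg hlt]
      refine iff_of_false (by simp) ?_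
      rintro ⟨k, hk1, hk2⟩
      have hk : a.toNat ≤ Nat.factorial k := le_trans hk1 (Nat.self_le_factorial k)
      omega

lemma bPeel_spec (fu : ℕ) :
    ∀ m d : Int, 1 ≤ m → 2 ≤ d → m.toNat ≤ fu →
      (bPeel fu m d = true ↔
        ∃ j : ℕ, (d - 1).toNat ≤ j ∧ m.toNat * Nat.factorial (d - 1).toNat = Nat.factorial j) := by
  induction fu with
  | zero => intro m d hm hd hfu; omega
  | succ fu ih =>
    intro m d hm hd hfu
    have hmM : ((m.toNat : Int)) = m := Int.toNat_of_nonneg (by omega)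
    have hdD : ((d.toNat : Int)) = d := Int.toNat_of_nonneg (by omega)
    have hD2 : 2 ≤ d.toNat := by omega
    have hD1 : (d - 1).toNat = d.toNat - 1 := by omega
    simp only [bPeel]
    split_ifs with h1 hmod
    · -- m = 1
      refine iff_of_true rfl ⟨(d - 1).toNat, le_rfl, ?_⟩
      rw [h1]
      simp
    · -- divisible step
      have hdvd : d ∣ m := (PySem.Int.mod_eq_zero_iff_dvd m d).mp hmod
      have hDM : d.toNat ∣ m.toNat := by
        rw [← hmM, ← hdD] at hdvd; exact_mod_cast hdvd
      have hMpos : 1 ≤ m.toNat := by omega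
      have hq : m.toNat / d.toNat * d.toNat = m.toNat := Nat.div_mul_cancel hDM
      have hdivpos : 0 < m.toNat / d.toNat :=
        Nat.div_pos (Nat.le_of_dvd (by omega) hDM) (by omega)
      have hfl : PySem.Int.floordiv m d = ((m.toNat / d.toNat : ℕ) : Int) := by
        rw [← hmM, ← hdD]
        exact_mod_cast PySem.Int.floordiv_natCast m.toNat d.toNat
      have hlt : m.toNat / d.toNat < m.toNat := Nat.div_lt_self (by omega) (by omega)
      rw [hfl]
      rw [ih _ (d + 1) (by exact_mod_cast (by omega : 1 ≤ m.toNat / d.toNat)) (by omega)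
            (by rw [Int.toNat_natCast]; omega)]
      have hD1' : (d + 1 - 1).toNat = d.toNat := by omega
      have hfac : d.toNat * Nat.factorial (d.toNat - 1) = Nat.factorial d.toNat :=
        Nat.mul_factorial_pred (by omega)
      rw [hD1', Int.toNat_natCast, hD1]
      constructor
      · rintro ⟨j, hj1, hj2⟩
        refine ⟨j, by omega, ?_⟩
        calc m.toNat * Nat.factorial (d.toNat - 1)
            = m.toNat / d.toNat * d.toNat * Nat.factorial (d.toNat - 1) := by rw [hq]
          _ = m.toNat / d.toNat * (d.toNat * Nat.factorial (d.toNat - 1)) := by ring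
          _ = m.toNat / d.toNat * Nat.factorial d.toNat := by rw [hfac]
          _ = Nat.factorial j := hj2
      · rintro ⟨j, hj1, hj2⟩
        have hM1 : m.toNat ≠ 1 := by
          intro hM
          exact h1 (by omega)
        have hjD : d.toNat ≤ j := by
          rcases Nat.lt_or_ge j d.toNat with hlt' | hge
          · exfalso
            have hje : j = d.toNat - 1 := by omega
            rw [hje] at hj2
            have := Nat.eq_of_mul_eq_mul_right (Nat.factorial_pos (d.toNat - 1))
              (by rw [hj2, Nat.one_mul] :
                m.toNat * Nat.factorial (d.toNat - 1) = 1 * Nat.factorial (d.toNat - 1))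
            omega
          · exact hge
        refine ⟨j, hjD, ?_⟩
        calc m.toNat / d.toNat * Nat.factorial d.toNat
            = m.toNat / d.toNat * (d.toNat * Nat.factorial (d.toNat - 1)) := by rw [hfac]
          _ = m.toNat / d.toNat * d.toNat * Nat.factorial (d.toNat - 1) := by ring
          _ = m.toNat * Nat.factorial (d.toNat - 1) := by rw [hq]
          _ = Nat.factorial j := hj2
    · -- not divisible: no factorial continuation
      refine iff_of_false (by simp) ?_
      rintro ⟨j, hj1, hj2⟩
      rw [hD1] at hj1 hj2
      have hM1 : m.toNat ≠ 1 := by intro hM; exact h1 (by omega)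
      have hjD : d.toNat ≤ j := by
        rcases Nat.lt_or_ge j d.toNat with hlt' | hge
        · exfalso
          have hje : j = d.toNat - 1 := by omega
          rw [hje] at hj2
          have := Nat.eq_of_mul_eq_mul_right (Nat.factorial_pos (d.toNat - 1))
            (by rw [hj2, Nat.one_mul] :
              m.toNat * Nat.factorial (d.toNat - 1) = 1 * Nat.factorial (d.toNat - 1))
          omega
        · exact hge
      obtain ⟨q, hqj⟩ := Nat.factorial_dvd_factorial hjD
      have hfac : d.toNat * Nat.factorial (d.toNat - 1) = Nat.factorial d.toNat :=
        Nat.mul_factorial_pred (by omega)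
      have hMq : m.toNat = d.toNat * q := by
        have hcalc : m.toNat * Nat.factorial (d.toNat - 1)
            = d.toNat * q * Nat.factorial (d.toNat - 1) := by
          rw [hj2, hqj, ← hfac]; ring
        exact Nat.eq_of_mul_eq_mul_right (Nat.factorial_pos _) hcalc
      apply hmod
      rw [PySem.Int.mod_eq_zero_iff_dvd]
      rw [← hmM, ← hdD]
      exact Int.natCast_dvd_natCast.mpr ⟨q, hMq⟩

-- ===== VERDICT (by name: the statement is the Claim_ definition above) =====
theorem is_brocard_prime_spec : Claim_equal_is_brocard_prime := by
  intro num _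
  unfold Spec_is_brocard_prime is_brocard_prime is_brocard_prime_alt
  rw [prime_eq]
  cases hb : b_is_prime num
  · rfl
  · simp only [Bool.not_true, Bool.false_eq_true, if_false]
    have h2 : 2 ≤ num := ((b_is_prime_iff num).mp hb).1
    have hA := aSearch_spec num (num - 1).toNat 1 (by norm_num) (by omega)
    have hB := bPeel_spec num.toNat (num - 1) 2 (by omega) (by norm_num) (by omega)
    cases hL : aSearch num 1 <;>
      cases hR : bPeel num.toNat (num - 1) 2 <;> try rfl
    · rw [hL] at hA; rw [hR] at hB
      exfalso
      obtain ⟨j, hj1, hj2⟩ := hB.mp rfl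
      rw [show ((2:Int) - 1).toNat = 1 by norm_num, Nat.factorial_one, Nat.mul_one] at hj2
      refine (by simp : ¬ (false = true)) (hA.mpr ⟨j, ?_, ?_⟩)
      · norm_num; omega
      · omega
    · rw [hL] at hA; rw [hR] at hB
      exfalso
      obtain ⟨k, hk1, hk2⟩ := hA.mp rfl
      refine (by simp : ¬ (false = true)) (hB.mpr ⟨k, ?_, ?_⟩)
      · norm_num at hk1 ⊢; omega
      · rw [show ((2:Int) - 1).toNat = 1 by norm_num, Nat.factorial_one, Nat.mul_one]
        omega
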